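-- pv_equiv track=rewrite | github.com/cafe-virtuel/Mem4ristor | src/mem4ristor/metrics.py | _lz76_phrases
-- ===== SOURCE A (Python) =====
-- def _lz76_phrases(s: str) -> int:
--     """
--     LZ76 greedy parsing: count distinct phrases.
--     O(n²) worst case but fine for typical trace lengths (T~300).
--     """
--     if not s:
--         return 0
--     dictionary: set[str] = set()
--     phrase = ""
--     count = 0
--     for ch in s:
--         candidate = phrase + ch
--         if candidate in dictionary:
--             phrase = candidate
--         else:
--             dictionary.add(candidate)
--             count += 1
--             phrase = ""
--     if phrase:
--         count += 1
--     return count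
-- ===== SOURCE B (Python) =====
-- def _lz76_phrases(s: str) -> int:
--     """
--     Phrase-at-a-time scan over positions: for each phrase start i, advance j
--     while the slice s[i:j] is an already-seen phrase, then record s[i:j] as a
--     new phrase; a trailing fully-matched slice counts as one extra phrase.
--     """
--     seen = set()
--     count = 0
--     i, n = 0, len(s)
--     while i < n:
--         j = i + 1
--         while j <= n and s[i:j] in seen:
--             j += 1
--         if j > n:
--             return count + 1
--         seen.add(s[i:j])
--         count += 1
--         i = j
--     return count
-- ===== Notes on version B (the rewrite author's own statement) =====
-- stated objective: alternative
-- what changed: Replaced the single character-by-character pass that accumulates a growing phrase string with a per-phrase index scan: an outer loop over phrase start positions i and an inner loop advancing j while the slice s[i:j] is an already-seen phrase, recording one phrase per outer iteration.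
import Mathlib
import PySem

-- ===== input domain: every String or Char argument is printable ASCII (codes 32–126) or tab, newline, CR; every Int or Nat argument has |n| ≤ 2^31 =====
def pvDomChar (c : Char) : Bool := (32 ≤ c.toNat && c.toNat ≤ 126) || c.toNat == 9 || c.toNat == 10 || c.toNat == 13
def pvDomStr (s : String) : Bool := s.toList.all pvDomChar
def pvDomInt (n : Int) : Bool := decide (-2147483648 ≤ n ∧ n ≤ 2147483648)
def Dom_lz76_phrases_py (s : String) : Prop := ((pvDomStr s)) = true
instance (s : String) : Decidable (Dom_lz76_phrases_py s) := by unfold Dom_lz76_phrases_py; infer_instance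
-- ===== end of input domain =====

-- B replaces A's single char-by-char pass with a growing-phrase accumulator by a
-- per-phrase index scan testing slices s[i:j] against the seen set: an alternative
-- decomposition, same return value.

-- ===== PORT A =====
-- loop body of A: candidate = phrase + ch; extend phrase or register a new phrase
def stepA (st : PySem.Set (List Char) × List Char × Int) (ch : Char) :
    PySem.Set (List Char) × List Char × Int :=
  let cand := st.2.1 ++ [ch]
  if PySem.Set.contains st.1 cand then (st.1, cand, st.2.2)
  else (PySem.Set.add st.1 cand, [], st.2.2 + 1)

def lz76_phrases_py (s : String) : Int :=
  if s.toList = [] then 0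
  else
    let st := s.toList.foldl stepA (PySem.Set.empty, [], 0)
    if st.2.1 ≠ [] then st.2.2 + 1 else st.2.2

-- ===== PORT B =====
-- inner while of B: advance j while the slice s[i:j] is an already-seen phrase
def extendB (L : List Char) (seen : PySem.Set (List Char)) (i j : Nat) : Nat :=
  if j ≤ L.length ∧ PySem.Set.contains seen (PySem.List.slice L (some (i : Int)) (some (j : Int))) = true then
    extendB L seen i (j + 1)
  else j
termination_by L.length + 1 - j
decreasing_by omega

lemma extendB_ge (L : List Char) (seen : PySem.Set (List Char)) (i j : Nat) :
    j ≤ extendB L seen i j := by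
  unfold extendB
  split
  · exact le_trans (by omega) (extendB_ge L seen i (j + 1))
  · exact le_rfl
termination_by L.length + 1 - j
decreasing_by omega

-- outer while of B: one iteration per phrase start i
def loopB (L : List Char) (seen : PySem.Set (List Char)) (count : Int) (i : Nat) : Int :=
  if h : i < L.length then
    let j := extendB L seen i (i + 1)
    if j > L.length then count + 1
    else loopB L (PySem.Set.add seen (PySem.List.slice L (some (i : Int)) (some (j : Int)))) (count + 1) j
  else count
termination_by L.length - i
decreasing_by
  have := extendB_ge L seen i (i + 1)
  omega

def lz76_phrases_py_alt (s : String) : Int := loopB s.toList PySem.Set.empty 0 0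

-- ===== PRECONDITION & SPEC =====
def Spec_lz76_phrases_py (s : String) (out : Int) : Prop := out = lz76_phrases_py_alt s
instance (s : String) (out : Int) : Decidable (Spec_lz76_phrases_py s out) := by unfold Spec_lz76_phrases_py; infer_instance

-- ===== CLAIM (what is proved, stated in full; the proofs are below) =====
def Claim_equal_lz76_phrases_py : Prop := ∀ (s : String), Dom_lz76_phrases_py s → Spec_lz76_phrases_py s (lz76_phrases_py s)

-- ===== LEMMAS AND PROOFS =====

-- the slice s[i:j] for natural indices, as drop/take
def sl (L : List Char) (i j : Nat) : List Char := (L.drop i).take (j - i)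

lemma sl_eq_slice (L : List Char) (i j : Nat) :
    PySem.List.slice L (some (i : Int)) (some (j : Int)) = sl L i j :=
  PySem.List.slice_natCast L i j

lemma sl_self (L : List Char) (i : Nat) : sl L i i = [] := by simp [sl]

lemma sl_snoc (L : List Char) {i m : Nat} (him : i ≤ m) (hm : m < L.length) :
    sl L i m ++ [L[m]] = sl L i (m + 1) := by
  unfold sl
  have h1 : m + 1 - i = (m - i) + 1 := by omega
  have h2 : m - i < (L.drop i).length := by simp; omega
  rw [h1, List.take_add_one, List.getElem?_eq_getElem h2]
  simp [List.getElem_drop, Nat.add_sub_cancel' him]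

lemma sl_ne_nil (L : List Char) {i m : Nat} (him : i < m) (hi : i < L.length) :
    sl L i m ≠ [] := by
  apply List.ne_nil_of_length_pos
  simp [sl]
  omega

def finA (st : PySem.Set (List Char) × List Char × Int) : Int :=
  if st.2.1 ≠ [] then st.2.2 + 1 else st.2.2

-- A's fold from a phrase boundary i equals B's per-phrase scan from i
lemma key (L : List Char) : ∀ (fuel i : Nat) (seen : PySem.Set (List Char)) (k : Int),
    L.length ≤ i + fuel → i ≤ L.length →
    finA (List.foldl stepA (seen, [], k) (L.drop i)) = loopB L seen k i := by
  intro fuel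
  induction fuel with
  | zero =>
    intro i seen k h1 h2
    have hi : i = L.length := by omega
    subst hi
    rw [loopB]
    simp [finA]
  | succ fuel ih =>
    intro i seen k h1 h2
    by_cases hi : i < L.length
    · -- invariant of the inner while: A's fold with phrase s[i:m] vs extendB from m+1
      have inner : ∀ (fm m : Nat), L.length ≤ m + fm → i ≤ m → m ≤ L.length →
          finA (List.foldl stepA (seen, sl L i m, k) (L.drop m)) =
          (if extendB L seen i (m + 1) > L.length then k + 1
           else loopB L (PySem.Set.add seen (sl L i (extendB L seen i (m + 1))))
                  (k + 1) (extendB L seen i (m + 1))) := by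
        intro fm
        induction fm with
        | zero =>
          intro m hm him hmn
          have hmeq : m = L.length := by omega
          subst hmeq
          have hext : extendB L seen i (L.length + 1) = L.length + 1 := by
            rw [extendB]; simp
          rw [hext, if_pos (by omega)]
          simp [finA, sl_ne_nil L (by omega : i < L.length) hi]
        | succ fm ihm =>
          intro m hm him hmn
          by_cases hmlt : m < L.length
          · rw [List.drop_eq_getElem_cons hmlt, List.foldl_cons]
            have hcand : sl L i m ++ [L[m]] = sl L i (m + 1) := sl_snoc L him hmlt
            by_cases hc : PySem.Set.contains seen (sl L i (m + 1)) = true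
            · -- extend the phrase / inner while advances
              have hA : stepA (seen, sl L i m, k) L[m] = (seen, sl L i (m + 1), k) := by
                simp only [stepA, hcand]
                rw [if_pos hc]
              have hext : extendB L seen i (m + 1) = extendB L seen i (m + 2) := by
                rw [extendB, if_pos ⟨by omega, by rw [sl_eq_slice]; exact hc⟩]
              rw [hA, hext]
              exact ihm (m + 1) (by omega) (by omega) (by omega)
            · -- new phrase: both sides register s[i:m+1] and restart at m+1
              have hA : stepA (seen, sl L i m, k) L[m] =
                  (PySem.Set.add seen (sl L i (m + 1)), [], k + 1) := by
                simp only [stepA, hcand]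
                rw [if_neg hc]
              have hext : extendB L seen i (m + 1) = m + 1 := by
                rw [extendB, if_neg (by rintro ⟨-, hcc⟩; rw [sl_eq_slice] at hcc; exact hc hcc)]
              rw [hA, hext, if_neg (by omega)]
              exact ih (m + 1) _ (k + 1) (by omega) (by omega)
          · have hmeq : m = L.length := by omega
            subst hmeq
            have hext : extendB L seen i (L.length + 1) = L.length + 1 := by
              rw [extendB]; simp
            rw [hext, if_pos (by omega)]
            simp [finA, sl_ne_nil L (by omega : i < L.length) hi]
      have h0 := inner (L.length - i) i (by omega) le_rfl (le_of_lt hi)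
      rw [sl_self] at h0
      rw [h0]
      conv_rhs => rw [loopB]
      rw [dif_pos hi]
      simp only [sl_eq_slice]
    · have hieq : i = L.length := by omega
      subst hieq
      rw [loopB]
      simp [finA]

-- ===== VERDICT (by name: the statement is the Claim_ definition above) =====
theorem lz76_phrases_py_spec : Claim_equal_lz76_phrases_py := by
  intro s _
  unfold Spec_lz76_phrases_py lz76_phrases_py lz76_phrases_py_alt
  by_cases h : s.toList = []
  · rw [if_pos h, h, loopB]
    simp
  · rw [if_neg h]
    have := key s.toList s.toList.length 0 PySem.Set.empty 0 (by omega) (by omega)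
    rw [List.drop_zero] at this
    exact this
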